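-- pv_equiv track=rewrite | github.com/bitonpro/nervesys | infra/ai360api/generate_port_ranges_fixed.py | allocate_blocks
-- ===== SOURCE A (Python) =====
-- def allocate_blocks(blocks, chunk, needed):
--     starts=[]
--     for s,e in blocks:
--         cur=s
--         while cur+chunk-1<=e and len(starts)<needed:
--             starts.append(cur)
--             cur += chunk
--         if len(starts)>=needed: break
--     return [(st, st+chunk-1) for st in starts]
-- ===== SOURCE B (Python) =====
-- def allocate_blocks(blocks, chunk, needed):
--     starts = []
--     for s, e in blocks:
--         if len(starts) >= needed:
--             break
--         avail = (e - s + 1) // chunk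
--         take = min(max(avail, 0), needed - len(starts))
--         starts.extend(range(s, s + take * chunk, chunk))
--     return [(st, st + chunk - 1) for st in starts]
-- ===== Notes on version B (the rewrite author's own statement) =====
-- stated objective: alternative
-- what changed: Replaces A's inner while-loop that appends one start per chunk with a per-block arithmetic count take = min(max((e-s+1)//chunk,0), needed-len) and a single range() extension, so each block needs one division instead of a Python-level loop.
-- outside the precondition, e.g. on allocate_blocks([(1, 5)], 0, 3): A returns [(1, 0), (1, 0), (1, 0)], B raises ZeroDivisionError; on allocate_blocks([(1, 5)], -1, 3): A returns [(1, -1), (0, -2), (-1, -3)], B returns []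
import Mathlib
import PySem

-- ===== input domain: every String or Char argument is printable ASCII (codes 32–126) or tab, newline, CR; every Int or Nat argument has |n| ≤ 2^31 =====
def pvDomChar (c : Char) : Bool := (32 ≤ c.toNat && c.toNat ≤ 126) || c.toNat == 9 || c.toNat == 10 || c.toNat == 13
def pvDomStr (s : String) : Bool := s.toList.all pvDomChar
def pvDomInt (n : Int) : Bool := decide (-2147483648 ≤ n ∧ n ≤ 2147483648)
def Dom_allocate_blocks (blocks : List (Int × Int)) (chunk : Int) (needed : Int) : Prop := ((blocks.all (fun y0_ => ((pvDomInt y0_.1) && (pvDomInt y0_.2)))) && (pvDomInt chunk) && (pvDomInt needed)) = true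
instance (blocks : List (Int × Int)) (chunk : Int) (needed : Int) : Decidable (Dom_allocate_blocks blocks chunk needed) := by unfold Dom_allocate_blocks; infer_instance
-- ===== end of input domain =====

-- B replaces A's chunk-by-chunk inner while-loop with a per-block arithmetic count and one range() extension (objective: alternative decomposition).


-- ===== PORT A =====
-- inner while-loop of A: while cur+chunk-1<=e and len(starts)<needed: starts.append(cur); cur += chunk
-- terminates because the guard forces starts to grow towards needed each iteration
def aInner (e chunk needed : Int) (cur : Int) (starts : List Int) : List Int :=
  if cur + chunk - 1 ≤ e ∧ (starts.length : Int) < needed then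
    aInner e chunk needed (cur + chunk) (starts ++ [cur])
  else starts
termination_by (needed - starts.length).toNat
decreasing_by simp only [List.length_append, List.length_cons, List.length_nil]; omega

-- outer for-loop of A with its break
def aOuter (blocks : List (Int × Int)) (chunk needed : Int) (starts : List Int) : List Int :=
  match blocks with
  | [] => starts
  | (s, e) :: rest =>
    let st2 := aInner e chunk needed s starts
    if needed ≤ (st2.length : Int) then st2 else aOuter rest chunk needed st2

def allocate_blocks (blocks : List (Int × Int)) (chunk : Int) (needed : Int) : List (Int × Int) :=
  (aOuter blocks chunk needed []).map (fun st => (st, st + chunk - 1))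

-- ===== PORT B =====
-- B's single loop: per block, take = min(max((e-s+1)//chunk, 0), needed-len); extend with range(s, s+take*chunk, chunk)
def bOuter (blocks : List (Int × Int)) (chunk needed : Int) (starts : List Int) : List Int :=
  match blocks with
  | [] => starts
  | (s, e) :: rest =>
    if needed ≤ (starts.length : Int) then starts
    else
      let avail := PySem.Int.floordiv (e - s + 1) chunk
      let take := min (max avail 0) (needed - starts.length)
      bOuter rest chunk needed (starts ++ PySem.List.pyRange s (s + take * chunk) chunk)

def allocate_blocks_alt (blocks : List (Int × Int)) (chunk : Int) (needed : Int) : List (Int × Int) :=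
  (bOuter blocks chunk needed []).map (fun st => (st, st + chunk - 1))

-- ===== PRECONDITION & SPEC =====
-- Pre_ restricts to the natural domain of positive chunk sizes (or requests where no allocation is
-- attempted at all: no blocks, or needed ≤ 0): for chunk ≤ 0 with a real request, A's non-advancing
-- or descending inner loop returns degenerate (empty/inverted) ranges as an artifact, while B's floor
-- division raises ZeroDivisionError at chunk = 0 and takes nothing for negative chunk.
def Pre_allocate_blocks (blocks : List (Int × Int)) (chunk : Int) (needed : Int) : Prop := 0 < chunk ∨ blocks = [] ∨ needed ≤ 0
instance (blocks : List (Int × Int)) (chunk : Int) (needed : Int) : Decidable (Pre_allocate_blocks blocks chunk needed) := by unfold Pre_allocate_blocks; infer_instance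

def pvWitness_allocate_blocks : (List (Int × Int)) × Int × Int := ([(1, 10), (20, 25)], 4, 3)

def Spec_allocate_blocks (blocks : List (Int × Int)) (chunk : Int) (needed : Int) (out : List (Int × Int)) : Prop := out = allocate_blocks_alt blocks chunk needed
instance (blocks : List (Int × Int)) (chunk : Int) (needed : Int) (out : List (Int × Int)) : Decidable (Spec_allocate_blocks blocks chunk needed out) := by unfold Spec_allocate_blocks; infer_instance

-- ===== CLAIM (what is proved, stated in full; the proofs are below) =====
def Claim_equal_allocate_blocks : Prop := ∀ (blocks : List (Int × Int)) (chunk : Int) (needed : Int), Dom_allocate_blocks blocks chunk needed → Pre_allocate_blocks blocks chunk needed → Spec_allocate_blocks blocks chunk needed (allocate_blocks blocks chunk needed)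

-- ===== LEMMAS AND PROOFS =====

-- the number of starts B's arithmetic takes from one block
def takeCnt (e chunk needed cur : Int) (len : Nat) : Int :=
  min (max ((e - cur + 1) / chunk) 0) (needed - len)

theorem range_chunk_eq (cur chunk t : Int) (hc : 0 < chunk) :
    PySem.List.pyRange cur (cur + t * chunk) chunk
      = (List.range t.toNat).map (fun k : Nat => cur + chunk * (k : Int)) := by
  rw [PySem.List.pyRange_of_pos _ _ hc]
  by_cases ht : t ≤ 0
  · have h1 : ¬ cur < cur + t * chunk := by nlinarith
    have h2 : t.toNat = 0 := by omega
    simp [h1, h2]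
  · have ht' : 0 < t := by omega
    have h1 : cur < cur + t * chunk := by nlinarith
    have h2 : (t * chunk + chunk - 1) / chunk = t := by
      have : t * chunk + chunk - 1 = (chunk - 1) + t * chunk := by ring
      rw [this, Int.add_mul_ediv_right _ _ (by omega : chunk ≠ 0),
        Int.ediv_eq_zero_of_lt (by omega) (by omega)]
      ring
    simp [h1, h2]

theorem aInner_eq (chunk : Int) (hc : 0 < chunk) (e needed : Int) :
    ∀ (cur : Int) (starts : List Int),
      aInner e chunk needed cur starts
        = starts ++ (List.range (takeCnt e chunk needed cur starts.length).toNat).map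
            (fun k : Nat => cur + chunk * (k : Int)) := by
  intro cur starts
  induction cur, starts using aInner.induct e chunk needed with
  | case1 cur starts hguard ih =>
    obtain ⟨hce, hlen⟩ := hguard
    rw [aInner, if_pos ⟨hce, hlen⟩, ih]
    have hA1 : 1 ≤ (e - cur + 1) / chunk := by
      rw [Int.le_ediv_iff_mul_le hc]; omega
    have hA' : (e - (cur + chunk) + 1) / chunk = (e - cur + 1) / chunk - 1 := by
      have : e - (cur + chunk) + 1 = (e - cur + 1) + (-1) * chunk := by ring
      rw [this, Int.add_mul_ediv_right _ _ (by omega : chunk ≠ 0)]; ring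
    have hts : takeCnt e chunk needed (cur + chunk) (starts ++ [cur]).length
        = takeCnt e chunk needed cur starts.length - 1 := by
      simp only [takeCnt, List.length_append, List.length_cons, List.length_nil]
      push_cast
      rw [hA']
      omega
    have htpos : 1 ≤ takeCnt e chunk needed cur starts.length := by
      simp only [takeCnt]; omega
    rw [hts]
    have hnat : (takeCnt e chunk needed cur starts.length).toNat
        = (takeCnt e chunk needed cur starts.length - 1).toNat + 1 := by omega
    rw [hnat, List.range_succ_eq_map]
    simp only [List.map_cons, List.map_map, List.append_assoc, List.singleton_append,
      Nat.cast_zero, mul_zero, add_zero]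
    congr 1
    congr 1
    apply List.map_congr_left
    intro k _
    simp only [Function.comp_apply]
    push_cast
    ring
  | case2 cur starts hguard =>
    rw [aInner, if_neg hguard]
    have ht : takeCnt e chunk needed cur starts.length ≤ 0 := by
      rcases not_and_or.mp hguard with h | h
      · have : (e - cur + 1) / chunk < 1 := by
          rw [Int.ediv_lt_iff_lt_mul hc]; omega
        simp only [takeCnt]; omega
      · simp only [takeCnt]; omega
    have : (takeCnt e chunk needed cur starts.length).toNat = 0 := by omega
    simp [this]

theorem bOuter_of_ge (blocks : List (Int × Int)) (chunk needed : Int) (starts : List Int)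
    (h : needed ≤ (starts.length : Int)) : bOuter blocks chunk needed starts = starts := by
  cases blocks with
  | nil => rfl
  | cons b rest => cases b with
    | mk s e => rw [bOuter, if_pos h]

theorem outer_eq (chunk : Int) (hc : 0 < chunk) (needed : Int) :
    ∀ (blocks : List (Int × Int)) (starts : List Int),
      aOuter blocks chunk needed starts = bOuter blocks chunk needed starts := by
  intro blocks
  induction blocks with
  | nil => intro starts; rfl
  | cons b rest ih =>
    cases b with
    | mk s e =>
      intro starts
      rw [aOuter, bOuter]
      have hfd : PySem.Int.floordiv (e - s + 1) chunk = (e - s + 1) / chunk :=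
        PySem.Int.floordiv_eq_ediv_of_pos hc
      have hst2 : aInner e chunk needed s starts
          = starts ++ (List.range (takeCnt e chunk needed s starts.length).toNat).map
              (fun k : Nat => s + chunk * (k : Int)) := aInner_eq chunk hc e needed s starts
      by_cases hge : needed ≤ (starts.length : Int)
      · -- B breaks immediately; A's inner loop takes nothing and then breaks
        rw [if_pos hge]
        have ht0 : (takeCnt e chunk needed s starts.length).toNat = 0 := by
          simp only [takeCnt]; omega
        rw [hst2, ht0]
        simp [hge]
      · rw [if_neg hge]
        simp only [hfd]
        have hbr : starts ++ PySem.List.pyRange s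
              (s + min (max ((e - s + 1) / chunk) 0) (needed - ↑starts.length) * chunk) chunk
            = aInner e chunk needed s starts := by
          rw [hst2, range_chunk_eq s chunk _ hc]; rfl
        rw [hbr]
        by_cases h2 : needed ≤ ((aInner e chunk needed s starts).length : Int)
        · rw [if_pos h2, bOuter_of_ge _ _ _ _ h2]
        · rw [if_neg h2, ih]

theorem aOuter_of_ge (blocks : List (Int × Int)) (chunk needed : Int) (starts : List Int)
    (h : needed ≤ (starts.length : Int)) : aOuter blocks chunk needed starts = starts := by
  cases blocks with
  | nil => rfl
  | cons b rest => cases b with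
    | mk s e =>
      have hg : ¬ (s + chunk - 1 ≤ e ∧ (starts.length : Int) < needed) := by omega
      rw [aOuter, aInner, if_neg hg, if_pos h]

-- ===== VERDICT (by name: the statement is the Claim_ definition above) =====
theorem allocate_blocks_spec : Claim_equal_allocate_blocks := by
  intro blocks chunk needed _ hpre
  unfold Spec_allocate_blocks allocate_blocks allocate_blocks_alt
  rcases hpre with hc | hnil | hneed
  · rw [outer_eq chunk hc needed blocks []]
  · subst hnil; rfl
  · rw [aOuter_of_ge blocks chunk needed [] (by simpa using hneed),
      bOuter_of_ge blocks chunk needed [] (by simpa using hneed)]
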